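-- pv_equiv track=rewrite | github.com/adamnemecek/AiFinalProject | siatec.py | compute_vector_representations
-- ===== SOURCE A (Python) =====
-- def compute_vector_representations(D, V):
--     X, i = list(), 0
--     num_vectors = len(V)
--     while i < num_vectors:
--         Q = list()
--         j = i + 1
--         while j < num_vectors and V[j][0] == V[i][0]:
--             strt_pt = D[V[j-1][1]]
--             end_pt = D[V[j][1]]
--             diff = tuple([e - s for s, e in zip(strt_pt, end_pt)])
--             Q.append(diff)
--             j += 1
--         X.append((i, Q))
--         i = j
--
--     return sorted(X, key=lambda v_set: (len(v_set[1]), v_set[1], v_set[0]))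
-- ===== SOURCE B (Python) =====
-- def compute_vector_representations(D, V):
--     runs = []
--     for idx, v in enumerate(V):
--         if runs and runs[-1][1][-1][0] == v[0]:
--             runs[-1][1].append(v)
--         else:
--             runs.append((idx, [v]))
--     X = [(start,
--           [(D[c[1]][0] - D[p[1]][0], D[c[1]][1] - D[p[1]][1])
--            for p, c in zip(run, run[1:])])
--          for start, run in runs]
--     return sorted(X, key=lambda v: (len(v[1]), v[1], v[0]))
-- ===== Notes on version B (the rewrite author's own statement) =====
-- stated objective: idiomatic
-- what changed: B replaces A's two nested index-driven while loops by a single enumerate pass that groups V into maximal runs in place, then computes each run's difference vectors with a zip(run, run[1:]) comprehension before the same final sort.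
import Mathlib
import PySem

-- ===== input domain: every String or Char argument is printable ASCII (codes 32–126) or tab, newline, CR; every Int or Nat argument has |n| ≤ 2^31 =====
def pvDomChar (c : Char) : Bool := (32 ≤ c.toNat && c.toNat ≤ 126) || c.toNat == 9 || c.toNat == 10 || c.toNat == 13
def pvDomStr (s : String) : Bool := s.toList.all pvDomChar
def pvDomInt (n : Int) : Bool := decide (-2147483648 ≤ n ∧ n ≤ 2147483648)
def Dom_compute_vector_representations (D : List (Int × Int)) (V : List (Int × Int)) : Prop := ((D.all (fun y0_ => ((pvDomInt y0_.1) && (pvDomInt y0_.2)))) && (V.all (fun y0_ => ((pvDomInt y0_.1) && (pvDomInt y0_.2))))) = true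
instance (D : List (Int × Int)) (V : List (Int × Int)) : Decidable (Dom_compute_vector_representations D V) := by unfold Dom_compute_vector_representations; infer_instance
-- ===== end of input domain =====

-- B replaces A's two nested index-driven while loops by a single enumerate pass that grows the
-- last run in place, followed by a zip(run, run[1:]) comprehension for the difference vectors
-- (objective: idiomatic; same result, including the final sort).

-- diff = tuple(e - s for s, e in zip(D[prev[1]], D[cur[1]])) — shared arithmetic of both Pythons;
-- D[·] is Python indexing (negative wraps, out of range raises → Pre_)
def pvDiff (D : List (Int × Int)) (p c : Int × Int) : Int × Int :=
  ((PySem.List.pyGetD D c.2 (0, 0)).1 - (PySem.List.pyGetD D p.2 (0, 0)).1,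
   (PySem.List.pyGetD D c.2 (0, 0)).2 - (PySem.List.pyGetD D p.2 (0, 0)).2)

-- sort key (len(v[1]), v[1], v[0]) encoded as a single List Int compared lexicographically:
-- [len] first, then the diff list flattened into fixed-width (2) blocks (lex-equivalent because
-- lengths are equal once len ties), then the start index; exact for Python's tuple comparison.
def pvKey (v : Int × List (Int × Int)) : List Int :=
  (v.2.length : Int) :: (v.2.flatMap (fun p => [p.1, p.2]) ++ [v.1])

-- ===== PORT A =====
-- inner while loop: walks j through the run of V[i]'s first coordinate, appending diffs to Q
def pvInnerA (D V : List (Int × Int)) (i j : Nat) (Q : List (Int × Int)) :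
    List (Int × Int) × Nat :=
  if _h : j < V.length ∧ (V.getD j (0, 0)).1 = (V.getD i (0, 0)).1 then
    pvInnerA D V i (j + 1) (Q ++ [pvDiff D (V.getD (j - 1) (0, 0)) (V.getD j (0, 0))])
  else (Q, j)
termination_by V.length - j
decreasing_by omega

theorem pvInnerA_le (D V : List (Int × Int)) (i j : Nat) (Q : List (Int × Int)) :
    j ≤ (pvInnerA D V i j Q).2 := by
  rw [pvInnerA]
  split
  · exact le_trans (Nat.le_succ j) (pvInnerA_le D V i (j + 1) _)
  · simp
termination_by V.length - j
decreasing_by omega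

-- outer while loop: i jumps to the j the inner loop stopped at
def pvOuterA (D V : List (Int × Int)) (i : Nat) : List (Int × List (Int × Int)) :=
  if h : i < V.length then
    ((i : Int), (pvInnerA D V i (i + 1) []).1) :: pvOuterA D V (pvInnerA D V i (i + 1) []).2
  else []
termination_by V.length - i
decreasing_by have := pvInnerA_le D V i (i + 1) []; omega

def compute_vector_representations (D : List (Int × Int)) (V : List (Int × Int)) :
    List (Int × (List (Int × Int))) :=
  PySem.List.sorted (pvOuterA D V 0) pvKey false

-- ===== PORT B =====
-- one step of B's enumerate pass: extend the last run, or open a new one at index iv.1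
def pvStep (runs : List (Int × List (Int × Int))) (iv : Int × (Int × Int)) :
    List (Int × List (Int × Int)) :=
  match runs.getLast? with
  | some (st, run) =>
      if (run.getLast?.getD (0, 0)).1 = iv.2.1 then
        runs.dropLast ++ [(st, run ++ [iv.2])]
      else runs ++ [(iv.1, [iv.2])]
  | none => [(iv.1, [iv.2])]

def pvRuns (V : List (Int × Int)) : List (Int × List (Int × Int)) :=
  (PySem.List.enumerate V).foldl pvStep []

-- [diff(p, c) for p, c in zip(run, run[1:])]
def pvDiffs (D : List (Int × Int)) (run : List (Int × Int)) : List (Int × Int) :=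
  (run.zip run.tail).map (fun pc => pvDiff D pc.1 pc.2)

def compute_vector_representations_alt (D : List (Int × Int)) (V : List (Int × Int)) :
    List (Int × (List (Int × Int))) :=
  PySem.List.sorted ((pvRuns V).map (fun sr => (sr.1, pvDiffs D sr.2))) pvKey false

-- ===== PRECONDITION & SPEC =====
-- A indexes D exactly at the second components of adjacent V-entries whose first components are
-- equal; Pre_ requires those indices to be in Python range (negative wrap allowed) — outside it
-- A raises IndexError (and so does B).
def Pre_compute_vector_representations (D : List (Int × Int)) (V : List (Int × Int)) : Prop :=
  ∀ pr ∈ V.zip V.tail, pr.1.1 = pr.2.1 →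
    PySem.Raise.InRange D.length pr.1.2 ∧ PySem.Raise.InRange D.length pr.2.2
instance (D : List (Int × Int)) (V : List (Int × Int)) : Decidable (Pre_compute_vector_representations D V) := by unfold Pre_compute_vector_representations; infer_instance

def pvWitness_compute_vector_representations : (List (Int × Int)) × (List (Int × Int)) :=
  ([(0, 0), (1, 2)], [(0, 0), (0, 1), (1, 0)])

def Spec_compute_vector_representations (D : List (Int × Int)) (V : List (Int × Int)) (out : List (Int × (List (Int × Int)))) : Prop := out = compute_vector_representations_alt D V
instance (D : List (Int × Int)) (V : List (Int × Int)) (out : List (Int × (List (Int × Int)))) : Decidable (Spec_compute_vector_representations D V out) := by unfold Spec_compute_vector_representations; infer_instance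

-- ===== CLAIM (what is proved, stated in full; the proofs are below) =====
def Claim_equal_compute_vector_representations : Prop := ∀ (D : List (Int × Int)) (V : List (Int × Int)), Dom_compute_vector_representations D V → Pre_compute_vector_representations D V → Spec_compute_vector_representations D V (compute_vector_representations D V)

-- ===== LEMMAS AND PROOFS =====

-- maximal runs of equal first coordinates, the common shape both loop structures compute
def pvChunks : List (Int × Int) → List (List (Int × Int))
  | [] => []
  | x :: xs =>
      (x :: xs.takeWhile (fun y => decide (y.1 = x.1))) ::
        pvChunks (xs.dropWhile (fun y => decide (y.1 = x.1)))
termination_by l => l.length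
decreasing_by simpa using Nat.lt_succ_of_le (List.length_dropWhile_le _ _)

-- chunks annotated with their start index
def pvAnnRuns (k : Int) : List (List (Int × Int)) → List (Int × List (Int × Int))
  | [] => []
  | c :: cs => (k, c) :: pvAnnRuns (k + c.length) cs

theorem pvInnerA_spec (D V : List (Int × Int)) (i : Nat) (t : List (Int × Int)) :
    ∀ (r : List (Int × Int)) (j : Nat) (Q : List (Int × Int)),
    V.drop j = t ++ r → 0 < j →
    (∀ y ∈ t, y.1 = (V.getD i (0, 0)).1) →
    (∀ y ∈ r.head?, ¬ y.1 = (V.getD i (0, 0)).1) →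
    pvInnerA D V i j Q =
      (Q ++ ((V.getD (j - 1) (0, 0) :: t).zip t).map (fun pc => pvDiff D pc.1 pc.2),
       j + t.length) := by
  induction t with
  | nil =>
      intro r j Q hd _ _ hr
      rw [pvInnerA]
      split
      · rename_i h
        exfalso
        have hj : V[j]? = some (V.getD j (0, 0)) := by
          rw [List.getElem?_eq_getElem h.1]; simp [List.getD_eq_getElem?_getD, List.getElem?_eq_getElem h.1]
        have : (V.drop j)[0]? = some (V.getD j (0, 0)) := by
          rw [List.getElem?_drop]; simpa using hj
        rw [hd] at this
        cases r with
        | nil => simp at this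
        | cons y ys =>
            simp only [List.nil_append] at this hd
            have hvy : V.getD j (0, 0) = y := by
              have h0 : (V.drop j)[0]? = some y := by rw [hd]; simp
              rw [List.getElem?_drop] at h0
              simp only [Nat.add_zero] at h0
              simp [List.getD_eq_getElem?_getD, h0]
            exact hr y (by simp) (by rw [← hvy]; exact h.2)
      · simp
  | cons a t' ih =>
      intro r j Q hd hj ht hr
      have hja : V[j]? = some a := by
        have : (V.drop j)[0]? = some a := by rw [hd]; simp
        rw [List.getElem?_drop] at this; simpa using this
      have hjlt : j < V.length := by
        have := List.getElem?_eq_some_iff.mp hja; exact this.1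
      have hgd : V.getD j (0, 0) = a := by
        simp [List.getD_eq_getElem?_getD, hja]
      rw [pvInnerA]
      rw [dif_pos ⟨hjlt, by rw [hgd]; exact ht a (by simp)⟩]
      have hd' : V.drop (j + 1) = t' ++ r := by
        have : V.drop (j + 1) = (V.drop j).drop 1 := by
          rw [List.drop_drop]
        rw [this, hd]; simp
      rw [ih r (j + 1) _ hd' (by omega) (fun y hy => ht y (by simp [hy])) hr]
      have : (j + 1) - 1 = j := by omega
      rw [this, hgd]
      rw [Prod.mk.injEq]
      refine ⟨by simp [List.zip_cons_cons], by simp only [List.length_cons]; omega⟩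

theorem pvOuterA_spec (D V : List (Int × Int)) (i : Nat) :
    pvOuterA D V i =
      ((pvAnnRuns (i : Int) (pvChunks (V.drop i))).map (fun sr => (sr.1, pvDiffs D sr.2))) := by
  rw [pvOuterA]
  split
  · rename_i h
    have hne : V.drop i ≠ [] := by
      intro hnil
      have := List.drop_eq_nil_iff.mp hnil
      omega
    obtain ⟨x, xs, hx⟩ := List.exists_cons_of_ne_nil hne
    have hix : V[i]? = some x := by
      have : (V.drop i)[0]? = some x := by rw [hx]; simp
      rw [List.getElem?_drop] at this; simpa using this
    have hgd : V.getD i (0, 0) = x := by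
      simp [List.getD_eq_getElem?_getD, hix]
    set p : Int × Int → Bool := fun y => decide (y.1 = x.1) with hp
    set t := xs.takeWhile p with htdef
    set r := xs.dropWhile p with hrdef
    have htr : xs = t ++ r := (List.takeWhile_append_dropWhile).symm
    have hinner := pvInnerA_spec D V i t r (i + 1) []
      (by rw [show V.drop (i+1) = (V.drop i).drop 1 by rw [List.drop_drop], hx]
          simpa using htr)
      (by omega)
      (by intro y hy
          have := List.mem_takeWhile_imp hy
          rw [hgd]; simpa [hp] using this)
      (by intro y hy
          rw [hgd]
          have := List.head?_dropWhile_not p xs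
          rw [← hrdef] at this
          cases hh : r.head? with
          | none => simp [hh] at hy
          | some z =>
              rw [hh] at hy; simp at hy; subst hy
              rw [hh] at this; simpa [hp] using this)
    rw [hinner]
    have hsimp : (i + 1) - 1 = i := by omega
    rw [hsimp, hgd]
    have hchunks : pvChunks (V.drop i) = (x :: t) :: pvChunks r := by
      rw [hx, pvChunks]
    have hdrop1 : V.drop (i + 1) = t ++ r := by
      rw [show V.drop (i+1) = (V.drop i).drop 1 by rw [List.drop_drop], hx]
      simpa using htr
    have hdroprest : V.drop (i + 1 + t.length) = r := by
      have h2 : V.drop (i + 1 + t.length) = (V.drop (i + 1)).drop t.length := by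
        rw [List.drop_drop, Nat.add_comm]
      rw [h2, hdrop1, List.drop_left]
    rw [pvOuterA_spec D V (i + 1 + t.length), hdroprest, hchunks, pvAnnRuns]
    rw [List.map_cons, List.cons.injEq]
    refine ⟨by simp [pvDiffs], ?_⟩
    congr 2
    simp only [List.length_cons]
    push_cast
    ring
  · rename_i h
    have : V.drop i = [] := List.drop_eq_nil_iff.mpr (by omega)
    rw [this]
    simp [pvChunks, pvAnnRuns]
termination_by V.length - i
decreasing_by omega

theorem pvFoldB (rest : List (Int × Int)) :
    ∀ (k : Int) (done : List (Int × List (Int × Int))) (st : Int)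
      (cur : List (Int × Int)) (hc : cur ≠ []),
    (PySem.List.enumerate rest k).foldl pvStep (done ++ [(st, cur)]) =
      done ++ [(st, cur ++ rest.takeWhile (fun y => decide (y.1 = (cur.getLast hc).1)))]
        ++ pvAnnRuns (k + (rest.takeWhile (fun y => decide (y.1 = (cur.getLast hc).1))).length)
             (pvChunks (rest.dropWhile (fun y => decide (y.1 = (cur.getLast hc).1)))) := by
  induction rest with
  | nil => intro k done st cur hc; simp [PySem.List.enumerate, pvChunks, pvAnnRuns]
  | cons y ys ih =>
      intro k done st cur hc
      rw [PySem.List.enumerate_cons, List.foldl_cons]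
      have hstep : pvStep (done ++ [(st, cur)]) (k, y) =
          if (cur.getLast hc).1 = y.1 then done ++ [(st, cur ++ [y])]
          else (done ++ [(st, cur)]) ++ [(k, [y])] := by
        unfold pvStep
        rw [List.getLast?_concat]
        simp only [List.getLast?_eq_some_getLast hc, Option.getD_some, List.dropLast_concat]
      rw [hstep]
      by_cases hy : (cur.getLast hc).1 = y.1
      · rw [if_pos hy]
        have hc' : cur ++ [y] ≠ [] := by simp
        rw [ih (k + 1) done st (cur ++ [y]) hc']
        have hlast : (cur ++ [y]).getLast hc' = y := List.getLast_concat
        have hpred : (fun z : Int × Int => decide (z.1 = ((cur ++ [y]).getLast hc').1)) =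
            (fun z : Int × Int => decide (z.1 = (cur.getLast hc).1)) := by
          funext z; rw [hlast, ← hy]
        rw [hpred]
        have htw : (y :: ys).takeWhile (fun z : Int × Int => decide (z.1 = (cur.getLast hc).1)) =
            y :: ys.takeWhile (fun z : Int × Int => decide (z.1 = (cur.getLast hc).1)) := by
          rw [List.takeWhile_cons, if_pos (by simp [hy.symm])]
        have hdw : (y :: ys).dropWhile (fun z : Int × Int => decide (z.1 = (cur.getLast hc).1)) =
            ys.dropWhile (fun z : Int × Int => decide (z.1 = (cur.getLast hc).1)) := by
          rw [List.dropWhile_cons_of_pos (by simp [hy.symm])]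
        rw [htw, hdw]
        have harith : k + 1 + ((ys.takeWhile (fun z : Int × Int => decide (z.1 = (cur.getLast hc).1))).length : Int)
            = k + (((y :: ys.takeWhile (fun z : Int × Int => decide (z.1 = (cur.getLast hc).1))).length : Int)) := by
          simp only [List.length_cons]; push_cast; ring
        rw [harith]
        simp
      · rw [if_neg hy]
        have hc' : [y] ≠ [] := by simp
        rw [show (done ++ [(st, cur)]) ++ [(k, [y])] = (done ++ [(st, cur)]) ++ [((k : Int), [y])] from rfl]
        rw [ih (k + 1) (done ++ [(st, cur)]) k [y] hc']
        have hlast : ([y] : List (Int × Int)).getLast hc' = y := rfl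
        rw [hlast]
        have htw : (y :: ys).takeWhile (fun z : Int × Int => decide (z.1 = (cur.getLast hc).1)) = [] := by
          rw [List.takeWhile_cons, if_neg (by simpa using fun h => hy h.symm)]
        have hdw : (y :: ys).dropWhile (fun z : Int × Int => decide (z.1 = (cur.getLast hc).1)) =
            y :: ys := by
          rw [List.dropWhile_cons_of_neg (by simpa using fun h => hy h.symm)]
        rw [htw, hdw, pvChunks, pvAnnRuns]
        have harith : k + 1 + ((ys.takeWhile (fun z : Int × Int => decide (z.1 = y.1))).length : Int)
            = k + (List.length ([] : List (Int × Int)) : Int) + (((y :: ys.takeWhile (fun z : Int × Int => decide (z.1 = y.1))).length : Int)) := by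
          simp only [List.length_cons, List.length_nil]; push_cast; ring
        rw [harith]
        simp

theorem pvRuns_spec (V : List (Int × Int)) : pvRuns V = pvAnnRuns 0 (pvChunks V) := by
  cases V with
  | nil => simp [pvRuns, PySem.List.enumerate, pvChunks, pvAnnRuns]
  | cons x xs =>
      unfold pvRuns
      rw [PySem.List.enumerate_cons, List.foldl_cons]
      have h0 : pvStep [] (0, x) = [] ++ [((0 : Int), [x])] := by simp [pvStep]
      rw [h0, show (0:Int) + 1 = 1 by norm_num, pvFoldB xs 1 [] 0 [x] (by simp)]
      have hlast : ([x] : List (Int × Int)).getLast (by simp) = x := rfl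
      rw [hlast, pvChunks, pvAnnRuns]
      have harith : (1 : Int) + ((xs.takeWhile (fun z : Int × Int => decide (z.1 = x.1))).length : Int)
          = 0 + (((x :: xs.takeWhile (fun z : Int × Int => decide (z.1 = x.1))).length : Int)) := by
        simp only [List.length_cons]; push_cast; ring
      rw [harith]
      simp

theorem pvPreSort_eq (D V : List (Int × Int)) :
    pvOuterA D V 0 = (pvRuns V).map (fun sr => (sr.1, pvDiffs D sr.2)) := by
  rw [pvRuns_spec, pvOuterA_spec D V 0]
  simp

-- ===== VERDICT (by name: the statement is the Claim_ definition above) =====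
theorem compute_vector_representations_spec : Claim_equal_compute_vector_representations := by
  intro D V _ _
  unfold Spec_compute_vector_representations compute_vector_representations
    compute_vector_representations_alt
  rw [pvPreSort_eq]
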